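-- pv_equiv track=rewrite | github.com/korcsmarosgroup/SalmoNet2 | guide/salmonet2_ortholog_mapper/salmonet2_ortholog_mapper.py | mapping_oma_ids
-- ===== SOURCE A (Python) =====
-- def mapping_oma_ids(oma_ids, interactor_a_ids, interactor_b_ids):
--
--     interactor_a = {}
--     interactor_b = {}
--
--     for keys, values in oma_ids.items():
--
--         for ids_a in interactor_a_ids:
--             if ids_a in values:
--                 if keys not in interactor_a:
--                     interactor_a[keys] = None
--
--         for ids_b in interactor_b_ids:
--             if ids_b in values:
--                 if keys not in interactor_b:
--                     interactor_b[keys] = None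
--
--     return interactor_a, interactor_b
-- ===== SOURCE B (Python) =====
-- def mapping_oma_ids(oma_ids, interactor_a_ids, interactor_b_ids):
--     # inverted index: value -> list of oma keys whose value-list contains it
--     index = {}
--     for key, values in oma_ids.items():
--         for v in values:
--             index.setdefault(v, []).append(key)
--
--     hits_a = set()
--     for ids_a in interactor_a_ids:
--         hits_a.update(index.get(ids_a, []))
--
--     hits_b = set()
--     for ids_b in interactor_b_ids:
--         hits_b.update(index.get(ids_b, []))
--
--     interactor_a = {keys: None for keys in oma_ids if keys in hits_a}
--     interactor_b = {keys: None for keys in oma_ids if keys in hits_b}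
--     return interactor_a, interactor_b
-- ===== Notes on version B (the rewrite author's own statement) =====
-- stated objective: faster
-- what changed: Replaces the per-key rescans of both interactor lists with a one-pass inverted index (value -> keys) plus set lookups, then emits each result dict in one ordered filter pass over the oma keys.
import Mathlib
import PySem

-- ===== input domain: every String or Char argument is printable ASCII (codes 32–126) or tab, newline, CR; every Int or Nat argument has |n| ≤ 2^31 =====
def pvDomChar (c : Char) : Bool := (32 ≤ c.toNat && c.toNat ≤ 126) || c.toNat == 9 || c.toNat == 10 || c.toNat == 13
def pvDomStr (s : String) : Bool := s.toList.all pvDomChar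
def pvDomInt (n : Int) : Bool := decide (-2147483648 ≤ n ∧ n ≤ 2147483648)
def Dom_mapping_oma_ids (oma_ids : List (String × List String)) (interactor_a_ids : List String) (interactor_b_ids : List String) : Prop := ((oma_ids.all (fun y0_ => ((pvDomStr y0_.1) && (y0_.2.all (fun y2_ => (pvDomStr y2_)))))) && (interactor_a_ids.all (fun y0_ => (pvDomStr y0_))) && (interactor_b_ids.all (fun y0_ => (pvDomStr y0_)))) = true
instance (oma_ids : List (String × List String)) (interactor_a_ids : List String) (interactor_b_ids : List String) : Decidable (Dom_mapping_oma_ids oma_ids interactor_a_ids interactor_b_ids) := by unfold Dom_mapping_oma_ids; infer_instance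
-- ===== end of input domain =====

-- B replaces A's per-key rescans of both interactor lists with an inverted index (value -> keys)
-- built in one pass, followed by set lookups and one ordered filter pass per result dict.


-- ===== PORT A =====
-- the dict parameter arrives as an assoc list; PySem.Dict.ofList is Python's dict(pairs)
def mapping_oma_ids (oma_ids : List (String × List String)) (interactor_a_ids : List String) (interactor_b_ids : List String) : (List (String × Option String)) × (List (String × Option String)) :=
  let d := PySem.Dict.ofList oma_ids
  let st := d.items.foldl
    (fun (acc : PySem.Dict String (Option String) × PySem.Dict String (Option String)) kv =>
      ( interactor_a_ids.foldl (fun ia ids_a =>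
          if ids_a ∈ kv.2 then (if ia.contains kv.1 then ia else ia.insert kv.1 none) else ia) acc.1,
        interactor_b_ids.foldl (fun ib ids_b =>
          if ids_b ∈ kv.2 then (if ib.contains kv.1 then ib else ib.insert kv.1 none) else ib) acc.2 ))
    (PySem.Dict.empty, PySem.Dict.empty)
  (st.1.items, st.2.items)

-- ===== PORT B =====
-- index.setdefault(v, []).append(key) is exactly Dict.modify v [] (· ++ [key])
def mapping_oma_ids_alt (oma_ids : List (String × List String)) (interactor_a_ids : List String) (interactor_b_ids : List String) : (List (String × Option String)) × (List (String × Option String)) :=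
  let d := PySem.Dict.ofList oma_ids
  let index : PySem.Dict String (List String) := d.items.foldl
    (fun idx kv => kv.2.foldl (fun idx v => idx.modify v [] (· ++ [kv.1])) idx) PySem.Dict.empty
  let hitsA : PySem.Set String :=
    interactor_a_ids.foldl (fun s i => PySem.Set.update s (index.getD i [])) PySem.Set.empty
  let hitsB : PySem.Set String :=
    interactor_b_ids.foldl (fun s i => PySem.Set.update s (index.getD i [])) PySem.Set.empty
  ( (d.items.filter (fun kv => PySem.Set.contains hitsA kv.1)).map (fun kv => (kv.1, (none : Option String))),
    (d.items.filter (fun kv => PySem.Set.contains hitsB kv.1)).map (fun kv => (kv.1, (none : Option String))) )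

-- ===== PRECONDITION & SPEC =====
def Spec_mapping_oma_ids (oma_ids : List (String × List String)) (interactor_a_ids : List String) (interactor_b_ids : List String) (out : (List (String × Option String)) × (List (String × Option String))) : Prop := out = mapping_oma_ids_alt oma_ids interactor_a_ids interactor_b_ids
instance (oma_ids : List (String × List String)) (interactor_a_ids : List String) (interactor_b_ids : List String) (out : (List (String × Option String)) × (List (String × Option String))) : Decidable (Spec_mapping_oma_ids oma_ids interactor_a_ids interactor_b_ids out) := by unfold Spec_mapping_oma_ids; infer_instance

-- ===== CLAIM (what is proved, stated in full; the proofs are below) =====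
def Claim_equal_mapping_oma_ids : Prop := ∀ (oma_ids : List (String × List String)) (interactor_a_ids : List String) (interactor_b_ids : List String), Dom_mapping_oma_ids oma_ids interactor_a_ids interactor_b_ids → Spec_mapping_oma_ids oma_ids interactor_a_ids interactor_b_ids (mapping_oma_ids oma_ids interactor_a_ids interactor_b_ids)

-- ===== LEMMAS AND PROOFS =====

-- A's inner loop over one interactor list: inserts k once iff some id matches and k is fresh
theorem innerA_eq (a vs : List String) (k : String) (d : PySem.Dict String (Option String)) :
    a.foldl (fun ia i => if i ∈ vs then (if ia.contains k then ia else ia.insert k none) else ia) d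
      = if a.any (fun i => decide (i ∈ vs)) && !d.contains k then d.insert k none else d := by
  induction a generalizing d with
  | nil => simp
  | cons i a ih =>
    by_cases hi : i ∈ vs
    · by_cases hc : d.contains k
      · simp [hi, hc, ih]
      · simp only [List.foldl_cons, if_pos hi, hc, Bool.not_false]
        rw [ih]
        simp [PySem.Dict.contains_insert_self, hi]
    · simp only [List.foldl_cons, if_neg hi, ih]
      simp [hi]

-- A's outer loop appends, in item order, the fresh keys whose value list matches some id
theorem outerA_eq (a : List String) (items : List (String × List String))
    (d : PySem.Dict String (Option String))
    (h1 : (items.map (·.1)).Nodup) (h2 : ∀ kv ∈ items, d.contains kv.1 = false) :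
    (items.foldl (fun ia kv => a.foldl (fun ia i =>
        if i ∈ kv.2 then (if ia.contains kv.1 then ia else ia.insert kv.1 none) else ia) ia) d).items
      = d.items ++ (items.filter (fun kv => a.any (fun i => decide (i ∈ kv.2)))).map
            (fun kv => (kv.1, (none : Option String))) := by
  induction items generalizing d with
  | nil => simp
  | cons kv items ih =>
    simp only [List.foldl_cons]
    rw [innerA_eq]
    have hfresh := h2 kv (List.mem_cons_self)
    by_cases hp : (a.any (fun i => decide (i ∈ kv.2))) = true
    · simp only [hp, hfresh, Bool.not_false, Bool.and_true, if_pos]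
      rw [ih _ (List.nodup_cons.mp h1).2 (fun kv' hkv' => ?_)]
      · rw [PySem.Dict.items_insert_of_not_contains _ _ hfresh]
        simp [hp]
      · rw [PySem.Dict.contains_insert]
        have hne : kv'.1 ≠ kv.1 := by
          intro he
          have hm : kv'.1 ∈ items.map (·.1) := List.mem_map_of_mem hkv'
          rw [he] at hm
          exact (List.nodup_cons.mp h1).1 (by simpa using hm)
        simp [hne, h2 kv' (List.mem_cons_of_mem _ hkv')]
    · simp only [hp, Bool.false_and, if_neg Bool.false_ne_true]
      rw [ih _ (List.nodup_cons.mp h1).2 (fun kv' hkv' => h2 kv' (List.mem_cons_of_mem _ hkv'))]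
      simp [hp]

-- one value list of B's index build: k' gets listed under c iff k' is this key and c occurs
theorem index_inner_mem (vs : List String) (k : String) (idx : PySem.Dict String (List String))
    (c k' : String) :
    (k' ∈ (vs.foldl (fun idx v => idx.modify v [] (· ++ [k])) idx).getD c []) ↔
      (k' ∈ idx.getD c [] ∨ (k' = k ∧ c ∈ vs)) := by
  induction vs generalizing idx with
  | nil => simp
  | cons v vs ih =>
    simp only [List.foldl_cons]
    rw [ih, PySem.Dict.getD_modify]
    by_cases hc : c = v
    · subst hc
      simp only [if_true, List.mem_append, List.mem_cons, true_or]
      constructor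
      · rintro ((h | h) | h) <;> tauto
      · rintro (h | ⟨h, -⟩) <;> tauto
    · simp only [if_neg hc, List.mem_cons]
      tauto

-- B's inverted index: k is listed under c iff some item (k, vs) has c among vs
theorem index_mem (items : List (String × List String)) (idx : PySem.Dict String (List String))
    (c k : String) :
    (k ∈ (items.foldl (fun idx kv => kv.2.foldl (fun idx v => idx.modify v [] (· ++ [kv.1])) idx)
        idx).getD c []) ↔ (k ∈ idx.getD c [] ∨ ∃ kv ∈ items, kv.1 = k ∧ c ∈ kv.2) := by
  induction items generalizing idx with
  | nil => simp
  | cons kv items ih =>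
    simp only [List.foldl_cons]
    rw [ih]
    rw [index_inner_mem]
    constructor
    · rintro ((h | ⟨hk, hc⟩) | ⟨kv', h1, h2, h3⟩)
      · exact Or.inl h
      · exact Or.inr ⟨kv, List.mem_cons_self, hk.symm ▸ rfl, hc⟩
      · exact Or.inr ⟨kv', List.mem_cons_of_mem _ h1, h2, h3⟩
    · rintro (h | ⟨kv', hmem, hk, hc⟩)
      · exact Or.inl (Or.inl h)
      · rcases List.mem_cons.mp hmem with rfl | hmem'
        · exact Or.inl (Or.inr ⟨hk.symm, hc⟩)
        · exact Or.inr ⟨kv', hmem', hk, hc⟩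

-- B's hit set: k is hit iff some interactor id lists k in the index
theorem hits_mem (a : List String) (index : PySem.Dict String (List String)) (k : String)
    (s : PySem.Set String) :
    (k ∈ a.foldl (fun s i => PySem.Set.update s (index.getD i [])) s) ↔
      (k ∈ s ∨ ∃ i ∈ a, k ∈ index.getD i []) := by
  induction a generalizing s with
  | nil => simp
  | cons i a ih =>
    simp only [List.foldl_cons]
    rw [ih, PySem.Set.mem_update]
    constructor
    · rintro (⟨h | h⟩ | ⟨i', hi', hk⟩)
      · exact Or.inl h
      · exact Or.inr ⟨i, List.mem_cons_self, h⟩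
      · exact Or.inr ⟨i', List.mem_cons_of_mem _ hi', hk⟩
    · rintro (h | ⟨i', hi', hk⟩)
      · exact Or.inl (Or.inl h)
      · rcases List.mem_cons.mp hi' with rfl | h'
        · exact Or.inl (Or.inr hk)
        · exact Or.inr ⟨i', h', hk⟩

-- with unique keys, membership of kv.1 in B's hit set is A's per-item test
theorem hits_contains_eq (a : List String) (items : List (String × List String))
    (h1 : (items.map (·.1)).Nodup) (kv : String × List String) (hkv : kv ∈ items) :
    PySem.Set.contains
      (a.foldl (fun s i => PySem.Set.update s
        ((items.foldl (fun idx kv => kv.2.foldl (fun idx v => idx.modify v [] (· ++ [kv.1])) idx)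
          PySem.Dict.empty).getD i [])) PySem.Set.empty) kv.1
      = a.any (fun i => decide (i ∈ kv.2)) := by
  rcases Bool.eq_false_or_eq_true (a.any (fun i => decide (i ∈ kv.2))) with hp | hp
  · rw [hp]
    obtain ⟨i, hi, hiv⟩ := List.any_eq_true.mp hp
    have hm : kv.1 ∈ a.foldl (fun s i => PySem.Set.update s
        ((items.foldl (fun idx kv => kv.2.foldl (fun idx v => idx.modify v [] (· ++ [kv.1])) idx)
          PySem.Dict.empty).getD i [])) PySem.Set.empty := by
      rw [hits_mem]
      exact Or.inr ⟨i, hi, (index_mem _ _ _ _).mpr (Or.inr ⟨kv, hkv, rfl, by simpa using hiv⟩)⟩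
    simp only [PySem.Set.empty] at hm
    simp [PySem.Set.contains, hm]
  · rw [hp]
    have hm : kv.1 ∉ a.foldl (fun s i => PySem.Set.update s
        ((items.foldl (fun idx kv => kv.2.foldl (fun idx v => idx.modify v [] (· ++ [kv.1])) idx)
          PySem.Dict.empty).getD i [])) PySem.Set.empty := by
      rw [hits_mem]
      rintro (h | ⟨i, hi, hk⟩)
      · simp [PySem.Set.empty] at h
      · rcases (index_mem _ _ _ _).mp hk with h | ⟨kv', hkv', hk1, hc⟩
        · simp [PySem.Dict.getD_empty] at h
        · have heq : kv' = kv := List.inj_on_of_nodup_map h1 hkv' hkv hk1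
          subst heq
          have : a.any (fun i => decide (i ∈ kv'.2)) = true :=
            List.any_eq_true.mpr ⟨i, hi, by simpa using hc⟩
          simp [this] at hp
    simp only [PySem.Set.empty] at hm
    simp [PySem.Set.contains, hm]

-- A's outer loop carries two independent accumulators; split it into two loops
theorem foldl_pair_split (a b : List String) (items : List (String × List String))
    (da db : PySem.Dict String (Option String)) :
    items.foldl (fun (acc : PySem.Dict String (Option String) × PySem.Dict String (Option String)) kv =>
      ( a.foldl (fun ia i =>
          if i ∈ kv.2 then (if ia.contains kv.1 then ia else ia.insert kv.1 none) else ia) acc.1,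
        b.foldl (fun ib i =>
          if i ∈ kv.2 then (if ib.contains kv.1 then ib else ib.insert kv.1 none) else ib) acc.2 ))
      (da, db)
    = ( items.foldl (fun d kv => a.foldl (fun ia i =>
          if i ∈ kv.2 then (if ia.contains kv.1 then ia else ia.insert kv.1 none) else ia) d) da,
        items.foldl (fun d kv => b.foldl (fun ib i =>
          if i ∈ kv.2 then (if ib.contains kv.1 then ib else ib.insert kv.1 none) else ib) d) db ) := by
  induction items generalizing da db with
  | nil => rfl
  | cons kv items ih =>
    simp only [List.foldl_cons]
    exact ih _ _

-- ===== VERDICT (by name: the statement is the Claim_ definition above) =====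
theorem mapping_oma_ids_spec : Claim_equal_mapping_oma_ids := by
  intro oma_ids a b _
  unfold Spec_mapping_oma_ids mapping_oma_ids mapping_oma_ids_alt
  simp only
  rw [foldl_pair_split]
  have hnd : (((PySem.Dict.ofList oma_ids).items).map (·.1)).Nodup :=
    PySem.Dict.nodup_keys_ofList oma_ids
  have hfresh : ∀ kv ∈ (PySem.Dict.ofList oma_ids).items,
      (PySem.Dict.empty : PySem.Dict String (Option String)).contains kv.1 = false := by
    intro kv _; simp [PySem.Dict.contains_empty]
  rw [outerA_eq a _ _ hnd hfresh, outerA_eq b _ _ hnd hfresh]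
  simp only [PySem.Dict.empty, List.nil_append]
  rw [Prod.mk.injEq]
  exact ⟨congrArg _ (List.filter_congr (fun kv hkv => (hits_contains_eq a _ hnd kv hkv).symm)),
         congrArg _ (List.filter_congr (fun kv hkv => (hits_contains_eq b _ hnd kv hkv).symm))⟩
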